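-- pv_equiv track=rewrite | github.com/agusvidaly/secuencias1 | m1-grupo1.py | orfs
-- ===== SOURCE A (Python) =====
-- def orfs(secuencia):
--   #output: diccionario con los ORFs
--   stop = ['TAA','TAG','TGA']
--   orfs = {}
--   for ML in secuencia:
--     seq = secuencia[ML]
--     orfs[ML] = []
--     contador = 0
--     for i in range(0, len(seq), 3):
--       codon = seq[i:i+3]
--       if codon in stop:
--         orfs[ML].append(contador)
--         contador = 0
--       else:
--         contador += 1
--   return orfs
-- ===== SOURCE B (Python) =====
-- def orfs(secuencia):
--   # Same result, different decomposition: split into codons, find stop positions,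
--   # then each ORF length is the gap between consecutive stop indices.
--   stop = ['TAA', 'TAG', 'TGA']
--   res = {}
--   for ML, seq in secuencia.items():
--     codons = [seq[i:i+3] for i in range(0, len(seq), 3)]
--     stops_idx = [j for j, c in enumerate(codons) if c in stop]
--     out = []
--     prev = -1
--     for idx in stops_idx:
--       out.append(idx - prev - 1)
--       prev = idx
--     res[ML] = out
--   return res
-- ===== Notes on version B (the rewrite author's own statement) =====
-- stated objective: alternative
-- what changed: Instead of a running counter reset at each stop codon, B slices the sequence into a codon list, collects the indices of stop codons, and derives each ORF length as the difference of consecutive stop indices (dropping the trailing run after the last stop, as A does).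
import Mathlib
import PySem

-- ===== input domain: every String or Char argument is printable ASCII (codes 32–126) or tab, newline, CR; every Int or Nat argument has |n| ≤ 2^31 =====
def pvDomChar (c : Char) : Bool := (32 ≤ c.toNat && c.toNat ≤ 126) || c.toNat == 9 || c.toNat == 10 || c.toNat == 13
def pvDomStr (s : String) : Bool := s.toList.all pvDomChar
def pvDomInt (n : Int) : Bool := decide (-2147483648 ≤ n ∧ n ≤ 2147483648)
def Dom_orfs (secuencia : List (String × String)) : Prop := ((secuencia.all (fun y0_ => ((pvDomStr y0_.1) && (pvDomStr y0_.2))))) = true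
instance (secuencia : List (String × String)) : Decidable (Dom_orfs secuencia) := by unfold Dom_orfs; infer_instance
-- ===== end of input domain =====

-- B replaces A's running counter (reset at each stop codon) by a different decomposition:
-- codon list → stop-codon indices → differences of consecutive stop indices; same cost, proved equal.

-- ===== PORT A =====
-- Python dict parameter → PySem.Dict built from the association list; `for ML in secuencia` iterates
-- the dict's keys, `secuencia[ML]` is a lookup (never missing, so getD's default is unreachable);
-- the mutation `orfs[ML].append(contador)` is ported as re-inserting the appended list at key ML.
def orfs (secuencia : List (String × String)) : List (String × List Int) :=
  let stop : List String := ["TAA", "TAG", "TGA"]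
  let d := PySem.Dict.ofList secuencia
  let o := d.keys.foldl (fun (o : PySem.Dict String (List Int)) ML =>
    let seq := d.getD ML ""
    let o := o.insert ML []
    let r := (PySem.List.pyRange 0 (PySem.Str.len seq) 3).foldl
      (fun (p : PySem.Dict String (List Int) × Int) i =>
        let codon := PySem.Str.slice seq (some i) (some (i + 3))
        if codon ∈ stop then (p.1.insert ML (p.1.getD ML [] ++ [p.2]), 0)
        else (p.1, p.2 + 1)) (o, 0)
    r.1) PySem.Dict.empty
  o.items

-- ===== PORT B =====
def orfs_alt (secuencia : List (String × String)) : List (String × List Int) :=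
  let stop : List String := ["TAA", "TAG", "TGA"]
  let res := (PySem.Dict.ofList secuencia).items.foldl
    (fun (res : PySem.Dict String (List Int)) kv =>
      let seq := kv.2
      let codons := (PySem.List.pyRange 0 (PySem.Str.len seq) 3).map
        (fun i => PySem.Str.slice seq (some i) (some (i + 3)))
      let stopsIdx := ((PySem.List.enumerate codons 0).filter
        (fun jc => decide (jc.2 ∈ stop))).map (·.1)
      let r := stopsIdx.foldl (fun (p : List Int × Int) idx =>
        (p.1 ++ [idx - p.2 - 1], idx)) ([], -1)
      res.insert kv.1 r.1) PySem.Dict.empty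
  res.items

-- ===== PRECONDITION & SPEC =====
def Spec_orfs (secuencia : List (String × String)) (out : List (String × List Int)) : Prop := out = orfs_alt secuencia
instance (secuencia : List (String × String)) (out : List (String × List Int)) : Decidable (Spec_orfs secuencia out) := by unfold Spec_orfs; infer_instance

-- ===== CLAIM (what is proved, stated in full; the proofs are below) =====
def Claim_equal_orfs : Prop := ∀ (secuencia : List (String × String)), Dom_orfs secuencia → Spec_orfs secuencia (orfs secuencia)

-- ===== LEMMAS AND PROOFS =====

def pvStop : List String := ["TAA", "TAG", "TGA"]

-- A's inner loop as a pure recursion over the codon list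
def pvGo : List String → Int → List Int
  | [], _ => []
  | c :: t, cnt => if c ∈ pvStop then cnt :: pvGo t 0 else pvGo t (cnt + 1)

-- B's differences of consecutive stop indices, as a pure recursion
def pvDiffs : Int → List Int → List Int
  | _, [] => []
  | p, i :: t => (i - p - 1) :: pvDiffs i t

def pvCodons (seq : String) : List String :=
  (PySem.List.pyRange 0 (PySem.Str.len seq) 3).map
    (fun i => PySem.Str.slice seq (some i) (some (i + 3)))

-- A's dict-level inner fold only rewrites key k, tracking pvGo of the codons
theorem pvFoldADict (is : List Int) (f : Int → String) (o : PySem.Dict String (List Int))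
    (k : String) : ∀ (L : List Int) (cnt : Int),
    (is.foldl (fun (p : PySem.Dict String (List Int) × Int) i =>
      if f i ∈ pvStop then (p.1.insert k (p.1.getD k [] ++ [p.2]), 0) else (p.1, p.2 + 1))
      (o.insert k L, cnt)).1
      = o.insert k (L ++ pvGo (is.map f) cnt) := by
  induction is with
  | nil => intro L cnt; simp [pvGo]
  | cons i t ih =>
      intro L cnt
      by_cases h : f i ∈ pvStop
      · simp only [List.foldl_cons, if_pos h, PySem.Dict.getD_insert_self,
          PySem.Dict.insert_insert_self]
        rw [ih]
        simp [pvGo, h]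
      · simp only [List.foldl_cons, if_neg h]
        rw [ih]
        simp [pvGo, h]

-- A's per-key step, with the running dict-and-counter fold collapsed to pvGo
theorem stepA (seq : String) (o : PySem.Dict String (List Int)) (k : String) :
    ((PySem.List.pyRange 0 (PySem.Str.len seq) 3).foldl
      (fun (p : PySem.Dict String (List Int) × Int) i =>
        if PySem.Str.slice seq (some i) (some (i + 3)) ∈ pvStop
        then (p.1.insert k (p.1.getD k [] ++ [p.2]), 0) else (p.1, p.2 + 1))
      (o.insert k [], 0)).1
      = o.insert k (pvGo (pvCodons seq) 0) := by
  rw [pvFoldADict (PySem.List.pyRange 0 (PySem.Str.len seq) 3)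
      (fun i => PySem.Str.slice seq (some i) (some (i + 3))) o k [] 0]
  simp [pvCodons]

-- B's output fold computes pvDiffs
theorem pvFoldB (idxs : List Int) : ∀ (acc : List Int) (p : Int),
    (idxs.foldl (fun (q : List Int × Int) idx => (q.1 ++ [idx - q.2 - 1], idx)) (acc, p)).1
      = acc ++ pvDiffs p idxs := by
  induction idxs with
  | nil => intro acc p; simp [pvDiffs]
  | cons i t ih =>
      intro acc p
      simp only [List.foldl_cons, ih, pvDiffs]
      simp

-- differences of consecutive stop indices = A's counter recursion
theorem pvDiffsStops (cs : List String) : ∀ (n p : Int),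
    pvDiffs p (((PySem.List.enumerate cs n).filter (fun jc => decide (jc.2 ∈ pvStop))).map (·.1))
      = pvGo cs (n - p - 1) := by
  induction cs with
  | nil => intro n p; simp [PySem.List.enumerate_nil, pvDiffs, pvGo]
  | cons c t ih =>
      intro n p
      rw [PySem.List.enumerate_cons]
      by_cases h : c ∈ pvStop
      · have e : pvDiffs n (((PySem.List.enumerate t (n + 1)).filter
            (fun jc => decide (jc.2 ∈ pvStop))).map (·.1)) = pvGo t 0 := by
          rw [ih (n + 1) n, show n + 1 - n - 1 = (0 : Int) from by ring]
        simp [h, pvDiffs, pvGo, e]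
      · have e : pvDiffs p (((PySem.List.enumerate t (n + 1)).filter
            (fun jc => decide (jc.2 ∈ pvStop))).map (·.1)) = pvGo t (n - p - 1 + 1) := by
          rw [ih (n + 1) p, show n + 1 - p - 1 = n - p - 1 + 1 from by ring]
        simp [h, pvGo, e]

-- B's per-key value equals pvGo of the codons
theorem stepB (seq : String) :
    ((((PySem.List.enumerate ((PySem.List.pyRange 0 (PySem.Str.len seq) 3).map
        (fun i => PySem.Str.slice seq (some i) (some (i + 3)))) 0).filter
        (fun jc => decide (jc.2 ∈ pvStop))).map (·.1)).foldl
      (fun (p : List Int × Int) idx => (p.1 ++ [idx - p.2 - 1], idx)) ([], -1)).1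
      = pvGo (pvCodons seq) 0 := by
  rw [pvFoldB]
  rw [pvDiffsStops]
  norm_num [pvCodons]

theorem orfs_eq (secuencia : List (String × String)) : orfs secuencia = orfs_alt secuencia := by
  unfold orfs orfs_alt
  simp only [show ["TAA", "TAG", "TGA"] = pvStop from rfl]
  set d := PySem.Dict.ofList secuencia with hd
  rw [PySem.List.foldl_congr_mem d.keys _
      (fun (o : PySem.Dict String (List Int)) k => o.insert k (pvGo (pvCodons (d.getD k "")) 0))
      PySem.Dict.empty (fun o ML _ => stepA (d.getD ML "") o ML)]
  rw [PySem.List.foldl_congr_mem d.items _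
      (fun (res : PySem.Dict String (List Int)) kv => res.insert kv.1 (pvGo (pvCodons kv.2) 0))
      PySem.Dict.empty (fun res kv _ => by rw [stepB kv.2])]
  rw [PySem.Dict.items_foldl_insert_fresh d.keys (fun k => k)
      (fun k => pvGo (pvCodons (d.getD k "")) 0) PySem.Dict.empty
      (fun a _ => PySem.Dict.contains_empty a)
      (by rw [List.map_id']; exact hd ▸ PySem.Dict.nodup_keys_ofList secuencia)]
  rw [PySem.Dict.items_foldl_insert_fresh d.items (fun kv => kv.1)
      (fun kv => pvGo (pvCodons kv.2) 0) PySem.Dict.empty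
      (fun a _ => PySem.Dict.contains_empty a.1)
      (hd ▸ PySem.Dict.nodup_keys_ofList secuencia)]
  rw [PySem.Dict.items_eq_map_keys d (PySem.Dict.nodup_keys_ofList secuencia) ""]
  simp [List.map_map, Function.comp_def]

-- ===== VERDICT (by name: the statement is the Claim_ definition above) =====
theorem orfs_spec : Claim_equal_orfs := by
  intro secuencia _
  show orfs secuencia = orfs_alt secuencia
  exact orfs_eq secuencia
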